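-- pv_equiv track=rewrite | github.com/andre23arruda/django-5 | apps/cup/models.py | round_robin_impar
-- ===== SOURCE A (Python) =====
-- def round_robin_impar(duplas) -> list:
--     '''Algoritmo Round Robin para número ímpar de duplas (com bye)'''
--     # Adiciona uma dupla "fantasma" para tornar o número par
--     duplas_com_bye = duplas + [None]  # None representa o "bye"
--     n = len(duplas_com_bye)
--     rodadas = []
--
--     duplas_rotacao = duplas_com_bye[1:]  # Remove a primeira dupla
--
--     for rodada in range(n - 1):
--         jogos_rodada = []
--
--         # Primeiro "jogo": primeira dupla vs a dupla atual da rotação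
--         oponente = duplas_rotacao[0]
--         if oponente is not None:  # Se não é bye
--             jogos_rodada.append((duplas_com_bye[0], oponente))
--
--         # Outros jogos: emparelha as duplas restantes
--         for i in range(1, n // 2):
--             dupla1 = duplas_rotacao[i]
--             dupla2 = duplas_rotacao[n - 1 - i]
--
--             # Só adiciona se nenhuma das duplas é None (bye)
--             if dupla1 is not None and dupla2 is not None:
--                 jogos_rodada.append((dupla1, dupla2))
--
--         if jogos_rodada:  # Só adiciona rodadas que tenham jogos
--             rodadas.append(jogos_rodada)
--
--         # Rotaciona as duplas (menos a primeira que fica fixa)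
--         duplas_rotacao = [duplas_rotacao[-1]] + duplas_rotacao[:-1]
--
--     return rodadas
-- ===== SOURCE B (Python) =====
-- def round_robin_impar(duplas) -> list:
--     '''Columnar construction: per slot-pair, zip two pre-reversed cyclic sequences
--     and extend every round's bucket at once; no rotating list is maintained.'''
--     m = len(duplas)
--     if m == 0:
--         return []
--     teams = duplas[1:] + [None]  # bye is the last label
--
--     def backwards_from(k):
--         # teams[k], teams[k-1], ..., teams[0], teams[m-1], ..., teams[k+1]
--         return list(reversed(teams[:k + 1])) + list(reversed(teams[k + 1:]))
--
--     anchor = duplas[0]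
--     rounds = [[(anchor, op)] if op is not None else [] for op in backwards_from(0)]
--     for i in range(1, (m + 1) // 2):
--         for b, d1, d2 in zip(rounds, backwards_from(i), backwards_from(m - i)):
--             if d1 is not None and d2 is not None:
--                 b.append((d1, d2))
--     return [b for b in rounds if b]
-- ===== Notes on version B (the rewrite author's own statement) =====
-- stated objective: alternative
-- what changed: B is built column-wise: for each slot-pair it materialises the whole column of a match across all rounds as a zip of two pre-reversed cyclic sequences (reversed list slices, no rotation state and no per-element index arithmetic) and extends every round's bucket at once; A builds row-wise, one round at a time, mutating a rotating list.
import Mathlib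
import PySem

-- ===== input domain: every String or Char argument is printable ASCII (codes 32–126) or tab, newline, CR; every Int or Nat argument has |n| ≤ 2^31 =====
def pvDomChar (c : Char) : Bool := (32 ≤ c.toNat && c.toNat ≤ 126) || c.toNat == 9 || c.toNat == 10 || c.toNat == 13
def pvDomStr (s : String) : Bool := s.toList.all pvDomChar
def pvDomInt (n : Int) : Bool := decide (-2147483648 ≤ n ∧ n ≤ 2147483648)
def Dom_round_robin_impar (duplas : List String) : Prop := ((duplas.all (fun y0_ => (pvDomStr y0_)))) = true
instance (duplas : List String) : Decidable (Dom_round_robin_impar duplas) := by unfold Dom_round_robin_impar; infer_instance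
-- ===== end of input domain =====

-- B builds the schedule column-wise (one column of matches across all rounds per slot-pair,
-- from zips of reversed slices) instead of A's row-wise rounds over a rotating list
-- (objective: alternative).

-- ===== PORT A =====
-- A's rotation step: [rot[-1]] + rot[:-1] (the loop only runs it on nonempty lists).
def rrRotR (l : List (Option String)) : List (Option String) :=
  (l.getLast?.elim [] fun x => [x]) ++ l.dropLast

-- one round of A: first game from the anchor, then the inner 'for i in range(1, n//2)'.
def rrRoundA (dcb rot : List (Option String)) (n : Nat) : List (String × String) :=
  let j0 : List (String × String) :=
    match rot.getD 0 none with
    | some op => [((dcb.getD 0 none).getD "", op)]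
    | none => []
  (List.range' 1 (n / 2 - 1)).foldl (fun acc i =>
    match rot.getD i none, rot.getD (n - 1 - i) none with
    | some d1, some d2 => acc ++ [(d1, d2)]
    | _, _ => acc) j0

def round_robin_impar (duplas : List String) : List (List (String × String)) :=
  let dcb : List (Option String) := duplas.map some ++ [none]
  let n := dcb.length
  ((List.range (n - 1)).foldl
    (fun (st : List (List (String × String)) × List (Option String)) _ =>
      let jogos := rrRoundA dcb st.2 n
      ((if jogos.isEmpty then st.1 else st.1 ++ [jogos]), rrRotR st.2))
    ([], dcb.drop 1)).1

-- ===== PORT B =====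
-- backwards_from(k) = list(reversed(teams[:k+1])) + list(reversed(teams[k+1:]))
def rrBack (l : List (Option String)) (k : Nat) : List (Option String) :=
  (l.take (k + 1)).reverse ++ (l.drop (k + 1)).reverse

def round_robin_impar_alt (duplas : List String) : List (List (String × String)) :=
  let m := duplas.length
  if m = 0 then []
  else
    let teams : List (Option String) := (duplas.drop 1).map some ++ [none]
    let anchor := duplas.headD ""
    -- rounds = [[(anchor, op)] if op is not None else [] for op in backwards_from(0)]
    let init : List (List (String × String)) :=
      (rrBack teams 0).map (fun op =>
        match op with
        | some x => [(anchor, x)]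
        | none => [])
    -- for i in range(1, (m+1)//2): rounds = [b + [(d1,d2)] if … else b for b,(d1,d2) in zip(rounds, zip(...))]
    let final := (List.range' 1 ((m + 1) / 2 - 1)).foldl
      (fun bs i =>
        List.zipWith (fun b p =>
            match p with
            | (some d1, some d2) => b ++ [(d1, d2)]
            | _ => b)
          bs ((rrBack teams i).zip (rrBack teams (m - i))))
      init
    final.filter (fun b => !b.isEmpty)

-- ===== PRECONDITION & SPEC =====
def Spec_round_robin_impar (duplas : List String) (out : List (List (String × String))) : Prop := out = round_robin_impar_alt duplas
instance (duplas : List String) (out : List (List (String × String))) : Decidable (Spec_round_robin_impar duplas out) := by unfold Spec_round_robin_impar; infer_instance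

-- ===== CLAIM (what is proved, stated in full; the proofs are below) =====
def Claim_equal_round_robin_impar : Prop := ∀ (duplas : List String), Dom_round_robin_impar duplas → Spec_round_robin_impar duplas (round_robin_impar duplas)

-- ===== LEMMAS AND PROOFS =====

theorem rrRotR_length (l : List (Option String)) (h : l ≠ []) :
    (rrRotR l).length = l.length := by
  unfold rrRotR
  rw [List.getLast?_eq_some_getLast h]
  have hp : 0 < l.length := List.length_pos_iff.mpr h
  simp [List.length_dropLast]
  omega

theorem rrRotR_iter_length (l : List (Option String)) (h : 0 < l.length) (t : Nat) :
    (rrRotR^[t] l).length = l.length := by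
  induction t with
  | zero => simp
  | succ t ih =>
      rw [Function.iterate_succ_apply', rrRotR_length, ih]
      intro he
      rw [he] at ih
      simp at ih
      omega

theorem rrRotR_getD (l : List (Option String)) (h : 0 < l.length) (j : Nat) (hj : j < l.length) :
    (rrRotR l).getD j none = l.getD ((j + l.length - 1) % l.length) none := by
  have hne : l ≠ [] := by intro he; simp [he] at h
  unfold rrRotR
  rw [List.getLast?_eq_some_getLast hne]
  cases j with
  | zero =>
      simp only [Option.elim, List.singleton_append, List.getD_cons_zero]
      have h1 : (0 + l.length - 1) % l.length = l.length - 1 := by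
        rw [Nat.mod_eq_of_lt] <;> omega
      rw [h1, List.getLast_eq_getElem, List.getD_eq_getElem l none (by omega)]
  | succ k =>
      simp only [Option.elim, List.singleton_append, List.getD_cons_succ]
      have hk : k < l.dropLast.length := by simp [List.length_dropLast]; omega
      have h1 : (k + 1 + l.length - 1) % l.length = k := by
        have : k + 1 + l.length - 1 = k + l.length := by omega
        rw [this, Nat.add_mod_right, Nat.mod_eq_of_lt (by omega)]
      rw [h1, List.getD_eq_getElem _ none hk, List.getD_eq_getElem l none (by omega)]
      simp [List.getElem_dropLast]

-- after t right-rotations, slot j holds the original slot (j - t) mod m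
theorem rrRotR_iter_getD (l : List (Option String)) (h : 0 < l.length) (t : Nat) :
    ∀ j : Nat, j < l.length →
    (rrRotR^[t] l).getD j none
      = l.getD ((((j : Int) - t) % (l.length : Int)).toNat) none := by
  induction t with
  | zero =>
      intro j hj
      simp only [Function.iterate_zero, id_eq, Nat.cast_zero, sub_zero]
      rw [Int.emod_eq_of_lt (by positivity) (by exact_mod_cast hj)]
      simp
  | succ t ih =>
      intro j hj
      rw [Function.iterate_succ_apply']
      have hlen : (rrRotR^[t] l).length = l.length := rrRotR_iter_length l h t
      rw [rrRotR_getD _ (by omega) j (by omega), hlen]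
      have hlt : (j + l.length - 1) % l.length < l.length := Nat.mod_lt _ h
      rw [ih _ hlt]
      congr 1
      have h1 : (j + l.length - 1 : Nat) = j + (l.length - 1) := by omega
      have h2 : ((l.length - 1 : Nat) : Int) = (l.length : Int) - 1 := by omega
      have hcast : (((j + l.length - 1) % l.length : Nat) : Int)
          = ((j : Int) + l.length - 1) % (l.length : Int) := by
        rw [h1, Int.natCast_mod]
        push_cast [h2]
        ring_nf
      rw [hcast]
      have e1 : (((j : Int) + l.length - 1) % (l.length : Int) - t) % (l.length : Int)
          = (((j : Int) + l.length - 1) - t) % (l.length : Int) := by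
        rw [Int.sub_emod, Int.emod_emod_of_dvd _ dvd_rfl, ← Int.sub_emod]
      rw [e1]
      have e2 : ((j : Int) + l.length - 1) - t = ((j : Int) - (t + 1)) + l.length := by
        ring
      rw [e2, Int.add_emod_right]
      norm_num

theorem rrBack_length (l : List (Option String)) (k : Nat) :
    (rrBack l k).length = l.length := by
  unfold rrBack
  simp
  omega

-- the k-th backwards cyclic sequence reads slot (k - r) mod m of the original list at position r
theorem rrBack_getD (l : List (Option String)) (k r : Nat)
    (hk : k < l.length) (hr : r < l.length) :
    (rrBack l k).getD r none = l.getD ((((k : Int) - r) % (l.length : Int)).toNat) none := by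
  unfold rrBack
  by_cases hc : r ≤ k
  · have hmod : (((k : Int) - r) % (l.length : Int)).toNat = k - r := by
      rw [Int.emod_eq_of_lt (by omega) (by omega)]
      omega
    rw [hmod]
    have hlt : r < (l.take (k + 1)).reverse.length := by
      simp; omega
    rw [List.getD_append _ _ _ _ hlt, List.getD_eq_getElem _ none hlt,
        List.getElem_reverse, List.getElem_take,
        List.getD_eq_getElem l none (by omega)]
    congr 1
    simp
    omega
  · have hmod : (((k : Int) - r) % (l.length : Int)).toNat = l.length + k - r := by
      have e : (k : Int) - r = ((l.length : Int) + k - r) + (l.length : Int) * (-1) := by ring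
      rw [e, Int.add_mul_emod_self_left, Int.emod_eq_of_lt (by omega) (by omega)]
      omega
    rw [hmod]
    have hlen1 : (l.take (k + 1)).reverse.length = k + 1 := by simp; omega
    have hge : (l.take (k + 1)).reverse.length ≤ r := by omega
    rw [List.getD_append_right _ _ _ _ hge, hlen1]
    have hlt2 : r - (k + 1) < (l.drop (k + 1)).reverse.length := by simp; omega
    rw [List.getD_eq_getElem _ none hlt2, List.getElem_reverse, List.getElem_drop,
        List.getD_eq_getElem l none (by omega)]
    congr 1
    simp
    omega

theorem rrBack_eq_rot (l : List (Option String)) (k r : Nat)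
    (hk : k < l.length) (hr : r < l.length) :
    (rrBack l k).getD r none = (rrRotR^[r] l).getD k none := by
  rw [rrBack_getD l k r hk hr, rrRotR_iter_getD l (by omega) r k hk]

-- A's stateful loop, written as a pure filter-of-map over round indices
theorem rrLoopA (dcb rot0 : List (Option String)) (n : Nat) :
    ∀ (k t : Nat) (acc : List (List (String × String))),
    ((List.range' t k).foldl
        (fun (st : List (List (String × String)) × List (Option String)) _ =>
          ((if (rrRoundA dcb st.2 n).isEmpty then st.1 else st.1 ++ [rrRoundA dcb st.2 n]),
            rrRotR st.2))
        (acc, rrRotR^[t] rot0)).1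
      = acc ++ ((List.range' t k).map (fun r => rrRoundA dcb (rrRotR^[r] rot0) n)).filter
          (fun b => !b.isEmpty) := by
  intro k
  induction k with
  | zero => intro t acc; simp
  | succ k ih =>
      intro t acc
      rw [List.range'_succ]
      simp only [List.foldl_cons, List.map_cons, List.filter_cons]
      rw [← Function.iterate_succ_apply' rrRotR t rot0, ih (t + 1)]
      by_cases h : (rrRoundA dcb (rrRotR^[t] rot0) n).isEmpty <;> simp [h]

-- one columnar pass of B updates every round bucket with that slot-pair's match
theorem rrColB_step (rot0 : List (Option String)) (i : Nat)
    (hi1 : 1 ≤ i) (hi2 : i < rot0.length) (q : Nat → List (String × String)) :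
    List.zipWith (fun b p =>
        match p with
        | (some d1, some d2) => b ++ [(d1, d2)]
        | _ => b)
      ((List.range rot0.length).map q)
      ((rrBack rot0 i).zip (rrBack rot0 (rot0.length - i)))
    = (List.range rot0.length).map (fun r =>
        match (rrRotR^[r] rot0).getD i none, (rrRotR^[r] rot0).getD (rot0.length - i) none with
        | some d1, some d2 => q r ++ [(d1, d2)]
        | _, _ => q r) := by
  apply List.ext_getElem
  · simp [rrBack_length]
  · intro r h1 h2
    have hr : r < rot0.length := by simpa using h2
    have hb1 : r < (rrBack rot0 i).length := by rw [rrBack_length]; exact hr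
    have hb2 : r < (rrBack rot0 (rot0.length - i)).length := by rw [rrBack_length]; exact hr
    rw [List.getElem_zipWith, List.getElem_map, List.getElem_range, List.getElem_map,
        List.getElem_range, List.getElem_zip]
    have e1 : (rrBack rot0 i)[r] = (rrRotR^[r] rot0).getD i none := by
      rw [← List.getD_eq_getElem _ none hb1, rrBack_eq_rot rot0 i r hi2 hr]
    have e2 : (rrBack rot0 (rot0.length - i))[r] = (rrRotR^[r] rot0).getD (rot0.length - i) none := by
      rw [← List.getD_eq_getElem _ none hb2, rrBack_eq_rot rot0 (rot0.length - i) r (by omega) hr]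
    rw [e1, e2]
    cases (rrRotR^[r] rot0).getD i none <;> cases (rrRotR^[r] rot0).getD (rot0.length - i) none <;> rfl

-- B's whole columnar fold equals a rounds-indexed map of A-shaped inner folds
theorem rrColsB (rot0 : List (Option String)) :
    ∀ (c s : Nat), (∀ i, s ≤ i → i < s + c → 1 ≤ i ∧ i < rot0.length) →
    ∀ (q : Nat → List (String × String)),
    (List.range' s c).foldl
        (fun bs i => List.zipWith (fun b p =>
            match p with
            | (some d1, some d2) => b ++ [(d1, d2)]
            | _ => b)
          bs ((rrBack rot0 i).zip (rrBack rot0 (rot0.length - i))))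
        ((List.range rot0.length).map q)
      = (List.range rot0.length).map (fun r =>
          (List.range' s c).foldl (fun b i =>
            match (rrRotR^[r] rot0).getD i none, (rrRotR^[r] rot0).getD (rot0.length - i) none with
            | some d1, some d2 => b ++ [(d1, d2)]
            | _, _ => b) (q r)) := by
  intro c
  induction c with
  | zero => intro s _ q; simp
  | succ c ih =>
      intro s hmem q
      rw [List.range'_succ]
      simp only [List.foldl_cons]
      obtain ⟨hs1, hs2⟩ := hmem s (le_refl s) (by omega)
      rw [rrColB_step rot0 s hs1 hs2 q]
      rw [ih (s + 1) (fun i h1 h2 => hmem i (by omega) (by omega))]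

-- ===== VERDICT (by name: the statement is the Claim_ definition above) =====
theorem round_robin_impar_spec : Claim_equal_round_robin_impar := by
  intro duplas _
  unfold Spec_round_robin_impar
  cases duplas with
  | nil => rfl
  | cons d ds =>
      show round_robin_impar (d :: ds) = round_robin_impar_alt (d :: ds)
      unfold round_robin_impar round_robin_impar_alt
      simp only [List.map_cons, List.cons_append, List.length_cons, List.length_append,
        List.length_map, List.length_nil, Nat.zero_add, List.drop_succ_cons, List.drop_zero,
        List.headD_cons]
      have hnz : ds.length + 1 ≠ 0 := by omega
      rw [if_neg hnz]
      set rot0 : List (Option String) := ds.map some ++ [none] with hrot0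
      have hL : rot0.length = ds.length + 1 := by simp [hrot0]
      have hn1 : ds.length + 1 + 1 - 1 = ds.length + 1 := by omega
      rw [hn1, List.range_eq_range']
      -- A side
      have hA := rrLoopA (some d :: rot0) rot0 (ds.length + 1 + 1) (ds.length + 1) 0 []
      simp only [Function.iterate_zero, id_eq, List.nil_append] at hA
      rw [hA]
      -- B side: init as a map over round indices
      have hinit : (rrBack rot0 0).map (fun op =>
          match op with
          | some x => [(d, x)]
          | none => ([] : List (String × String)))
          = (List.range rot0.length).map (fun r =>
              match (rrRotR^[r] rot0).getD 0 none with
              | some op => [(d, op)]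
              | none => []) := by
        apply List.ext_getElem
        · simp [rrBack_length]
        · intro r h1 h2
          have hr : r < rot0.length := by simpa [rrBack_length] using h1
          have hb : r < (rrBack rot0 0).length := by rw [rrBack_length]; exact hr
          rw [List.getElem_map, List.getElem_map, List.getElem_range]
          have e0 : (rrBack rot0 0)[r] = (rrRotR^[r] rot0).getD 0 none := by
            rw [← List.getD_eq_getElem _ none hb, rrBack_eq_rot rot0 0 r (by omega) hr]
          rw [e0]
      rw [hinit]
      simp only [← hL]
      rw [rrColsB rot0 ((rot0.length + 1) / 2 - 1) 1
        (fun i h1 h2 => ⟨h1, by omega⟩)]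
      congr 1
      simp only [List.range_eq_range']
      apply List.map_congr_left
      intro r _
      unfold rrRoundA
      simp only [List.getD_cons_zero, Option.getD_some]
      have harg : ∀ i : Nat, rot0.length + 1 - 1 - i = rot0.length - i := by omega
      apply PySem.List.foldl_congr_mem
      intro acc i _
      rw [harg i]
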